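-- pv_equiv track=rewrite | github.com/Yivxer/Archer | core/context.py | _extract_presence_summary
-- ===== SOURCE A (Python) =====
-- def _extract_presence_summary(presence_text: str) -> str:
--     """提取 PRESENCE 摘要（默认基调 + 回应节奏，控制长度）。"""
--     if not presence_text:
--         return ""
--     lines = presence_text.splitlines()
--     summary_lines = []
--     capture = False
--     section_count = 0
--     for line in lines:
--         if line.startswith("## "):
--             section_count += 1
--             capture = section_count <= 2  # 只取前两个 section
--         if capture and line.strip():
--             summary_lines.append(line)
--     return "\n".join(summary_lines[:25]) if summary_lines else presence_text[:400]
-- ===== SOURCE B (Python) =====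
-- def _extract_presence_summary(presence_text: str) -> str:
--     if not presence_text:
--         return ""
--     sections = []
--     for line in presence_text.splitlines():
--         if line.startswith("## "):
--             sections.append([])
--         if sections:
--             sections[-1].append(line)
--     summary_lines = [l for sec in sections[:2] for l in sec if l.strip()]
--     if summary_lines:
--         return "\n".join(summary_lines[:25])
--     return presence_text[:400]
-- ===== Notes on version B (the rewrite author's own statement) =====
-- stated objective: simpler
-- what changed: Replaces A's stateful capture/section_count flag machinery with a two-phase decomposition: first group lines into sections (a new group per '## ' header, pre-header lines dropped), then take the first two sections and filter/cap/join in one comprehension.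
import Mathlib
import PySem

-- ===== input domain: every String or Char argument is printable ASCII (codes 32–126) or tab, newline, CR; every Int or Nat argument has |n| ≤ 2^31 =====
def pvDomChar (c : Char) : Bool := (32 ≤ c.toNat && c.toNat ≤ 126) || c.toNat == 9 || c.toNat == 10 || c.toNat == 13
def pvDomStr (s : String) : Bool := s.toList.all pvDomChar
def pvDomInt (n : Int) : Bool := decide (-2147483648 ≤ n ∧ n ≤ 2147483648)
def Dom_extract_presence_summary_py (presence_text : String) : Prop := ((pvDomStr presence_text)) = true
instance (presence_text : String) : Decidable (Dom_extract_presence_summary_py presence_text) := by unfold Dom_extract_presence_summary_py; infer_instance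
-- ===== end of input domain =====

-- B replaces A's capture/section_count flag machinery with a two-phase decomposition
-- (group lines into sections, then filter/cap/join the first two sections); same cost.

-- ===== PORT A =====
-- loop body of A: update (summary_lines, capture, section_count) for one line
def pvStepA (st : List String × Bool × Int) (line : String) : List String × Bool × Int :=
  let st :=
    if PySem.Str.startswith line "## " then
      (st.1, decide (st.2.2 + 1 ≤ 2), st.2.2 + 1)
    else st
  if st.2.1 && !(PySem.Str.strip line == "") then (st.1 ++ [line], st.2.1, st.2.2) else st

def extract_presence_summary_py (presence_text : String) : String :=
  if presence_text == "" then ""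
  else
    let st := (PySem.Str.splitlines presence_text).foldl pvStepA ([], false, 0)
    if !(st.1 == []) then PySem.Str.join "\n" (PySem.List.slice st.1 none (some 25))
    else PySem.Str.slice presence_text none (some 400)

-- ===== PORT B =====
-- sections[-1].append(line) guarded by 'if sections:' (no-op on the empty list)
def pvAppendLast : List (List String) → String → List (List String)
  | [], _ => []
  | [s], line => [s ++ [line]]
  | s :: t :: rest, line => s :: pvAppendLast (t :: rest) line

-- loop body of B: open a new section on a '## ' header, then append the line to the last section
def pvStepB (S : List (List String)) (line : String) : List (List String) :=
  pvAppendLast (if PySem.Str.startswith line "## " then S ++ [[]] else S) line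

-- truthiness of l.strip()
def pvKeep (l : String) : Bool := !(PySem.Str.strip l == "")

def extract_presence_summary_py_alt (presence_text : String) : String :=
  if presence_text == "" then ""
  else
    let sections := (PySem.Str.splitlines presence_text).foldl pvStepB []
    let summary_lines :=
      (PySem.List.slice sections none (some 2)).flatMap (fun sec => sec.filter pvKeep)
    if !(summary_lines == []) then PySem.Str.join "\n" (PySem.List.slice summary_lines none (some 25))
    else PySem.Str.slice presence_text none (some 400)

-- ===== PRECONDITION & SPEC =====
def Spec_extract_presence_summary_py (presence_text : String) (out : String) : Prop := out = extract_presence_summary_py_alt presence_text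
instance (presence_text : String) (out : String) : Decidable (Spec_extract_presence_summary_py presence_text out) := by unfold Spec_extract_presence_summary_py; infer_instance

-- ===== CLAIM (what is proved, stated in full; the proofs are below) =====
def Claim_equal_extract_presence_summary_py : Prop := ∀ (presence_text : String), Dom_extract_presence_summary_py presence_text → Spec_extract_presence_summary_py presence_text (extract_presence_summary_py presence_text)

-- ===== LEMMAS AND PROOFS =====

-- abstraction: B's section list determines A's whole loop state
def pvAbs (S : List (List String)) : List String × Bool × Int :=
  ((S.take 2).flatMap (fun sec => sec.filter pvKeep),
   decide (1 ≤ S.length ∧ S.length ≤ 2),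
   (S.length : Int))

theorem pvAppendLast_concat (T : List (List String)) (l : List String) (line : String) :
    pvAppendLast (T ++ [l]) line = T ++ [l ++ [line]] := by
  induction T with
  | nil => rfl
  | cons a T ih =>
    cases T with
    | nil => rfl
    | cons b T => simpa [pvAppendLast] using ih

theorem pvAppendLast_length (S : List (List String)) (line : String) :
    (pvAppendLast S line).length = S.length := by
  induction S with
  | nil => rfl
  | cons a T ih =>
    cases T with
    | nil => rfl
    | cons b T => simpa [pvAppendLast] using ih

theorem pvAppendLast_take_one (b : List String) (X : List (List String)) (line : String) :
    List.take 1 (pvAppendLast (b :: X) line) = if X = [] then [b ++ [line]] else [b] := by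
  cases X with
  | nil => rfl
  | cons x xs => simp [pvAppendLast]

theorem pvStep_comm (S : List (List String)) (line : String) :
    pvStepA (pvAbs S) line = pvAbs (pvStepB S line) := by
  by_cases hh : PySem.Chars.startswith line.toList ['#', '#', ' '] = true <;>
    rcases S with _ | ⟨a, _ | ⟨b, T⟩⟩ <;>
    by_cases hk : pvKeep line = true <;>
    simp [pvStepA, pvStepB, pvAbs, pvAppendLast, pvAppendLast_concat, hh, hk,
          pvAppendLast_length, pvAppendLast_take_one,
          List.filter_append, pvKeep] at * <;>
    simp_all [List.filter_cons, List.filter_append, pvKeep] <;>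
    split_ifs <;> simp_all [List.filter_append, List.filter_cons, pvKeep]

theorem pvFold_comm (lines : List String) (S : List (List String)) :
    lines.foldl pvStepA (pvAbs S) = pvAbs (lines.foldl pvStepB S) := by
  induction lines generalizing S with
  | nil => rfl
  | cons a lines ih => simp only [List.foldl_cons, pvStep_comm, ih]

-- ===== VERDICT (by name: the statement is the Claim_ definition above) =====
theorem extract_presence_summary_py_spec : Claim_equal_extract_presence_summary_py := by
  intro t _
  unfold Spec_extract_presence_summary_py extract_presence_summary_py extract_presence_summary_py_alt
  by_cases h : t == ""
  · simp [h]
  · have h0 : (([], false, 0) : List String × Bool × Int) = pvAbs [] := by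
      simp [pvAbs]
    rw [if_neg h, if_neg h, h0, pvFold_comm]
    have h2 : PySem.List.slice ((PySem.Str.splitlines t).foldl pvStepB []) none (some 2)
        = ((PySem.Str.splitlines t).foldl pvStepB []).take 2 := by
      rw [show ((2:Int)) = ((2:Nat):Int) from rfl, PySem.List.slice_to_natCast]
    simp [pvAbs, h2]
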